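-- pv_equiv track=rewrite | github.com/Arvgov/RAG_AWS | streamlit.py | construct_context
-- ===== SOURCE A (Python) =====
-- from typing import List
--
-- max_section_len = 1000
--
-- separator = "\n"
--
-- def construct_context(contexts: List[str]) -> str:
--     chosen_sections = []
--     chosen_sections_len = 0
--
--     for text in contexts:
--         text = text.strip()
--         # Add contexts until we run out of space.
--         chosen_sections_len += len(text) + 2
--         if chosen_sections_len > max_section_len:
--             break
--         chosen_sections.append(text)
--     concatenated_doc = separator.join(chosen_sections)
--     return concatenated_doc
-- ===== SOURCE B (Python) =====
-- from typing import List
--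
-- max_section_len = 1000
--
-- separator = "\n"
--
-- def construct_context(contexts: List[str]) -> str:
--     # Binary search for the largest k such that the cost of the first k
--     # stripped sections (len + 2 each) fits in max_section_len.  Correct
--     # because every section costs at least 2, so the prefix cost is monotone.
--     stripped = [text.strip() for text in contexts]
--
--     def cost(k):
--         return sum(len(s) + 2 for s in stripped[:k])
--
--     lo, hi = 0, len(stripped)
--     while lo < hi:
--         mid = (lo + hi + 1) // 2
--         if cost(mid) <= max_section_len:
--             lo = mid
--         else:
--             hi = mid - 1
--     return separator.join(stripped[:lo])
-- ===== Notes on version B (the rewrite author's own statement) =====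
-- stated objective: alternative
-- what changed: Replaces A's greedy break-on-overflow accumulator loop with a binary search over the cutoff index for the largest prefix whose total cost (len+2 per stripped section) fits the budget, exploiting monotonicity of the prefix cost.
import Mathlib
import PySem

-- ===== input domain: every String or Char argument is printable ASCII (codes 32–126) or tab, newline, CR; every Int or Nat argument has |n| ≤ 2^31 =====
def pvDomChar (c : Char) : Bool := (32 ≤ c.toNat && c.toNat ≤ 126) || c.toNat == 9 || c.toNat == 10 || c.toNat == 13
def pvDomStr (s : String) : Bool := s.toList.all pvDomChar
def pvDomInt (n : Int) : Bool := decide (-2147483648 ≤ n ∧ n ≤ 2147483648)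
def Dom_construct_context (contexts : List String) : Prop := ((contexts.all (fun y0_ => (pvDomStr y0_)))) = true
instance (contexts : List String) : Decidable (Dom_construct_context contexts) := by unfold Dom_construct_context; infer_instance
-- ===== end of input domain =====

-- B replaces A's greedy break-on-overflow loop by a binary search over the cutoff index for the largest prefix whose cost fits the budget (alternative algorithm).


-- ===== PORT A =====
-- A's for-loop with break: state = (chosen_sections, chosen_sections_len)
def ccLoop (rest : List String) (chosen : List String) (len : Int) : List String :=
  match rest with
  | [] => chosen
  | t :: ts =>
    let t' := PySem.Str.strip t
    let len' := len + PySem.Str.len t' + 2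
    if len' > 1000 then chosen else ccLoop ts (chosen ++ [t']) len'

def construct_context (contexts : List String) : String :=
  PySem.Str.join "\n" (ccLoop contexts [] 0)

-- ===== PORT B =====
-- cost(k) = sum(len(s) + 2 for s in stripped[:k])
def ccCost (stripped : List String) (k : Int) : Int :=
  ((PySem.List.slice stripped none (some k)).map (fun s => PySem.Str.len s + 2)).sum

-- the while-loop of B's binary search; terminates because lo < mid ≤ hi
def ccBS (stripped : List String) (lo hi : Int) : Int :=
  if h : lo < hi then
    let mid := PySem.Int.floordiv (lo + hi + 1) 2
    if ccCost stripped mid ≤ 1000 then ccBS stripped mid hi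
    else ccBS stripped lo (mid - 1)
  else lo
termination_by (hi - lo).toNat
decreasing_by
  · have h2 : PySem.Int.floordiv (lo + hi + 1) 2 = (lo + hi + 1) / 2 :=
      PySem.Int.floordiv_eq_ediv_of_pos (by omega)
    omega
  · have h2 : PySem.Int.floordiv (lo + hi + 1) 2 = (lo + hi + 1) / 2 :=
      PySem.Int.floordiv_eq_ediv_of_pos (by omega)
    omega

def construct_context_alt (contexts : List String) : String :=
  let stripped := contexts.map PySem.Str.strip
  let lo := ccBS stripped 0 (stripped.length : Int)
  PySem.Str.join "\n" (PySem.List.slice stripped none (some lo))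

-- ===== PRECONDITION & SPEC =====
def Spec_construct_context (contexts : List String) (out : String) : Prop := out = construct_context_alt contexts
instance (contexts : List String) (out : String) : Decidable (Spec_construct_context contexts out) := by unfold Spec_construct_context; infer_instance

-- ===== CLAIM (what is proved, stated in full; the proofs are below) =====
def Claim_equal_construct_context : Prop := ∀ (contexts : List String), Dom_construct_context contexts → Spec_construct_context contexts (construct_context contexts)

-- ===== LEMMAS AND PROOFS =====

-- number of sections A's loop takes
def ccCut (rest : List String) (acc : Int) : Nat :=
  match rest with
  | [] => 0
  | t :: ts =>
    let l := acc + PySem.Str.len (PySem.Str.strip t) + 2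
    if l > 1000 then 0 else ccCut ts l + 1

-- cost of the first k stripped sections, Nat-indexed
def ccCostN (stripped : List String) (k : Nat) : Int :=
  ((stripped.take k).map (fun s => PySem.Str.len s + 2)).sum

theorem ccCostN_zero (ss : List String) : ccCostN ss 0 = 0 := by
  simp [ccCostN]

theorem ccCostN_cons_succ (s : String) (ss : List String) (n : Nat) :
    ccCostN (s :: ss) (n + 1) = (PySem.Str.len s + 2) + ccCostN ss n := by
  simp [ccCostN]

theorem ccCost_eq_costN (stripped : List String) (k : Int) (hk : 0 ≤ k) :
    ccCost stripped k = ccCostN stripped k.toNat := by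
  unfold ccCost ccCostN
  rw [PySem.List.slice_to _ hk, List.map_take]

theorem ccLen_nonneg (s : String) : 0 ≤ PySem.Str.len s := by
  rw [PySem.Str.len_eq]; positivity

theorem ccCostN_mono (stripped : List String) {j k : Nat} (h : j ≤ k) :
    ccCostN stripped j ≤ ccCostN stripped k := by
  unfold ccCostN
  rw [List.map_take, List.map_take]
  have htj : (stripped.map (fun s => PySem.Str.len s + 2)).take j
      = ((stripped.map (fun s => PySem.Str.len s + 2)).take k).take j := by
    rw [List.take_take, Nat.min_eq_left h]
  rw [htj]
  nth_rewrite 2 [← List.take_append_drop j ((stripped.map (fun s => PySem.Str.len s + 2)).take k)]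
  rw [List.sum_append]
  have : 0 ≤ (((stripped.map (fun s => PySem.Str.len s + 2)).take k).drop j).sum := by
    apply List.sum_nonneg
    intro x hx
    have hx2 : x ∈ stripped.map (fun s => PySem.Str.len s + 2) :=
      List.mem_of_mem_take (List.mem_of_mem_drop hx)
    obtain ⟨s, _, rfl⟩ := List.mem_map.mp hx2
    have := ccLen_nonneg s
    omega
  omega

theorem ccLoop_eq_take (rest : List String) (chosen : List String) (acc : Int) :
    ccLoop rest chosen acc = chosen ++ (rest.map PySem.Str.strip).take (ccCut rest acc) := by
  induction rest generalizing chosen acc with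
  | nil => simp [ccLoop, ccCut]
  | cons t ts ih =>
    simp only [ccLoop, ccCut, List.map_cons]
    split_ifs with h1
    · simp
    · rw [List.take_succ_cons, ih]
      simp

theorem ccCut_le_length (rest : List String) (acc : Int) : ccCut rest acc ≤ rest.length := by
  induction rest generalizing acc with
  | nil => simp [ccCut]
  | cons t ts ih =>
    simp only [ccCut, List.length_cons]
    split_ifs with h1
    · omega
    · exact Nat.succ_le_succ (ih _)

-- A's count fits the budget …
theorem ccCut_fits (rest : List String) (acc : Int) (hacc : acc ≤ 1000) :
    ccCostN (rest.map PySem.Str.strip) (ccCut rest acc) + acc ≤ 1000 := by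
  induction rest generalizing acc with
  | nil => simpa [ccCut, ccCostN_zero] using hacc
  | cons t ts ih =>
    simp only [ccCut, List.map_cons]
    split_ifs with h1
    · rw [ccCostN_zero]; omega
    · rw [ccCostN_cons_succ]
      have := ih (acc + PySem.Str.len (PySem.Str.strip t) + 2) (by omega)
      omega

-- … and one more section overflows it
theorem ccCut_next (rest : List String) (acc : Int)
    (hlt : ccCut rest acc < rest.length) :
    ccCostN (rest.map PySem.Str.strip) (ccCut rest acc + 1) + acc > 1000 := by
  induction rest generalizing acc with
  | nil => simp [ccCut] at hlt
  | cons t ts ih =>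
    simp only [ccCut, List.map_cons, List.length_cons] at *
    split_ifs at hlt ⊢ with h1
    · rw [ccCostN_cons_succ, ccCostN_zero]; omega
    · rw [ccCostN_cons_succ]
      have := ih (acc + PySem.Str.len (PySem.Str.strip t) + 2) (by omega)
      omega

-- binary-search correctness: with k the maximal fitting prefix, ccBS returns k
theorem ccBS_eq (stripped : List String) (k : Nat)
    (hfit : ccCostN stripped k ≤ 1000)
    (hnext : ∀ j : Nat, k < j → j ≤ stripped.length → ccCostN stripped j > 1000) :
    ∀ lo hi : Int, 0 ≤ lo → lo ≤ (k : Int) → (k : Int) ≤ hi → hi ≤ (stripped.length : Int) →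
      ccBS stripped lo hi = (k : Int) := by
  intro lo hi
  induction hn : (hi - lo).toNat using Nat.strong_induction_on generalizing lo hi with
  | _ n ih =>
  intro hlo0 hlo hhi hle
  rw [ccBS]
  split_ifs with h
  · have hmid : PySem.Int.floordiv (lo + hi + 1) 2 = (lo + hi + 1) / 2 :=
      PySem.Int.floordiv_eq_ediv_of_pos (by omega)
    have hb1 : lo < PySem.Int.floordiv (lo + hi + 1) 2 := by rw [hmid]; omega
    have hb2 : PySem.Int.floordiv (lo + hi + 1) 2 ≤ hi := by rw [hmid]; omega
    dsimp only
    split_ifs with hc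
    · -- cost mid ≤ 1000 ⇒ mid ≤ k
      have hmk : PySem.Int.floordiv (lo + hi + 1) 2 ≤ (k : Int) := by
        by_cases h' : PySem.Int.floordiv (lo + hi + 1) 2 ≤ (k : Int)
        · exact h'
        · exfalso
          rw [not_le] at h'
          rw [ccCost_eq_costN _ _ (by omega)] at hc
          have := hnext (PySem.Int.floordiv (lo + hi + 1) 2).toNat (by omega) (by omega)
          omega
      exact ih (hi - PySem.Int.floordiv (lo + hi + 1) 2).toNat (by omega) _ hi rfl (by omega) hmk hhi hle
    · -- cost mid > 1000 ⇒ k < mid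
      have hmk : (k : Int) < PySem.Int.floordiv (lo + hi + 1) 2 := by
        by_cases h' : (k : Int) < PySem.Int.floordiv (lo + hi + 1) 2
        · exact h'
        · exfalso
          rw [not_lt] at h'
          rw [ccCost_eq_costN _ _ (by omega)] at hc
          have := ccCostN_mono stripped
            (j := (PySem.Int.floordiv (lo + hi + 1) 2).toNat) (k := k) (by omega)
          omega
      exact ih (PySem.Int.floordiv (lo + hi + 1) 2 - 1 - lo).toNat (by omega) lo _ rfl hlo0 hlo
        (by omega) (by omega)
  · omega

-- ===== VERDICT (by name: the statement is the Claim_ definition above) =====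
theorem construct_context_spec : Claim_equal_construct_context := by
  intro contexts _
  unfold Spec_construct_context construct_context construct_context_alt
  have hkle : ccCut contexts 0 ≤ (contexts.map PySem.Str.strip).length := by
    rw [List.length_map]; exact ccCut_le_length _ _
  have hfit := ccCut_fits contexts 0 (by norm_num)
  have hnext : ∀ j : Nat, ccCut contexts 0 < j → j ≤ (contexts.map PySem.Str.strip).length →
      ccCostN (contexts.map PySem.Str.strip) j > 1000 := by
    intro j hj hjle
    rw [List.length_map] at hjle
    have h1 := ccCut_next contexts 0 (by omega)
    have h2 := ccCostN_mono (contexts.map PySem.Str.strip)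
      (j := ccCut contexts 0 + 1) (k := j) (by omega)
    omega
  have hbs := ccBS_eq (contexts.map PySem.Str.strip) (ccCut contexts 0) (by omega) hnext
    0 ((contexts.map PySem.Str.strip).length : Int) le_rfl (by omega)
    (by exact_mod_cast hkle) le_rfl
  dsimp only
  rw [hbs, PySem.List.slice_to_natCast, ccLoop_eq_take, List.nil_append]
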